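-- pv_equiv track=rewrite | github.com/beatbee/COMPRO-Python | quiz/quiz03.py | type2
-- ===== SOURCE A (Python) =====
-- import math
--
-- def check(l):
--     n = int(math.sqrt(l))+1
--     mn = 10000
--     ch = []
--     ans = 0
--     for i in range(1,n):
--         for j in range(1,n+1):
--             if i*j <= l :
--                 ch.append(j-i)
--                 if min(ch) <mn:
--                     mn = min(ch)
--                     ans = i
--     return ans+1
--
-- def type2(s):
--     n = check(len(s))
--     x = list(s)
--     lst = [['*']*n for i in range(n)]
--     a = 0
--     for i in range(n):
--         for j in range(n):
--             if a > len(s):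
--                 lst[j][i] == '*'
--             elif a<len(s):
--                 lst[j][i] = s[a]
--             a+=1
--     return lst
-- ===== SOURCE B (Python) =====
-- import math
--
-- def check(l):
--     n = int(math.sqrt(l))+1
--     mn = 10000
--     ch = []
--     ans = 0
--     for i in range(1,n):
--         for j in range(1,n+1):
--             if i*j <= l :
--                 ch.append(j-i)
--                 if min(ch) <mn:
--                     mn = min(ch)
--                     ans = i
--     return ans+1
--
-- def type2(s):
--     n = check(len(s))
--     pad = list(s) + ['*'] * (n * n - len(s))
--     columns = [pad[k * n:(k + 1) * n] for k in range(n)]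
--     return [list(row) for row in zip(*columns)]
-- ===== Notes on version B (the rewrite author's own statement) =====
-- stated objective: alternative
-- what changed: The grid is built by padding the character list to n*n with asterisk filler, slicing it into n column chunks and transposing with zip, instead of A's per-cell counter-driven in-place assignments into a pre-allocated grid; the helper check is kept verbatim.
import Mathlib
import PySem

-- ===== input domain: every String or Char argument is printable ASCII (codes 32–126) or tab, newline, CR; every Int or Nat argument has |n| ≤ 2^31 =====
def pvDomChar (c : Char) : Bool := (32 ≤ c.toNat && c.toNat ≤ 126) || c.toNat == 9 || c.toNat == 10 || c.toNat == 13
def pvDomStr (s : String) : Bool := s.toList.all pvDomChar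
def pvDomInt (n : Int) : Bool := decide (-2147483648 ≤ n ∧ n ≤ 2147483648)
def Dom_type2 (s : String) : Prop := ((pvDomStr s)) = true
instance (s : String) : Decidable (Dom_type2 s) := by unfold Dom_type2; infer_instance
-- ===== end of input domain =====

-- B builds the grid by padding the characters to n*n with the filler character, slicing into n column
-- chunks and transposing with zip, instead of A's counter-driven per-cell in-place
-- assignments (objective: alternative decomposition; the helper `check` is kept verbatim).

-- ===== PORT A =====
-- shared helper `check` (Source B contains it verbatim).
-- int(math.sqrt(l)) is ported as Nat.sqrt l.toNat: exact for 0 ≤ l < 2^52 (here l = len(s) ≥ 0).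
def check (l : Int) : Int :=
  let n : Int := ((Nat.sqrt l.toNat : Nat) : Int) + 1
  let st : Int × List Int × Int :=
    (PySem.List.pyRange 1 n 1).foldl (fun st i =>
      (PySem.List.pyRange 1 (n + 1) 1).foldl (fun st j =>
        let mn := st.1; let ch := st.2.1; let ans := st.2.2
        if i * j ≤ l then
          let ch' := ch ++ [j - i]
          -- min(ch'): ch' is nonempty here, so min? is some and the default 0 is never taken
          let m := (PySem.List.min? ch' (fun x => x)).getD 0
          if m < mn then (m, ch', i) else (mn, ch', ans)
        else st) st) (10000, [], 0)
  st.2.2 + 1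

def type2 (s : String) : List (List String) :=
  let n := check (PySem.Str.len s)
  let _x := s.toList.map (fun c => String.ofList [c])   -- x = list(s): assigned by A, never used
  -- lst = [['*']*n for i in range(n)]  (['*']*n is empty for n ≤ 0, as .toNat gives)
  let lst0 : List (List String) :=
    (PySem.List.pyRange 0 n 1).map (fun _ => List.replicate n.toNat "*")
  let res := (PySem.List.pyRange 0 n 1).foldl (fun (st : List (List String) × Int) i =>
    (PySem.List.pyRange 0 n 1).foldl (fun (st : List (List String) × Int) j =>
      let lst := st.1; let a := st.2
      if a > PySem.Str.len s then (lst, a + 1)   -- `lst[j][i] == '*'` : a no-op comparison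
      else if a < PySem.Str.len s then
        -- lst[j][i] = s[a]: j, i and a are always in range here, so pyGetD/pySetD are exact
        let v : String := match PySem.Str.pyGet? s a with
          | some c => String.ofList [c]
          | none => "*"   -- unreachable: 0 ≤ a < len(s)
        (PySem.List.pySetD lst j (PySem.List.pySetD (PySem.List.pyGetD lst j []) i v), a + 1)
      else (lst, a + 1)) st) (lst0, 0)
  res.1

-- ===== PORT B =====
-- termination measure fact for zipStar (used only by its decreasing_by)
theorem zipStar_sum_lt (cols : List (List String))
    (h : cols ≠ [] ∧ cols.all (fun c => !c.isEmpty)) :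
    ((cols.map List.tail).map List.length).sum < (cols.map List.length).sum := by
  obtain ⟨hne, hall⟩ := h
  cases cols with
  | nil => exact absurd rfl hne
  | cons c cs =>
    simp only [List.all_cons, Bool.and_eq_true] at hall
    have hc : c ≠ [] := by
      rcases hall with ⟨h1, -⟩
      cases c <;> simp_all
    have h2 : c.tail.length < c.length := by
      have := List.length_pos_iff.mpr hc
      simp [List.length_tail]; omega
    have hle : ∀ (ds : List (List String)),
        ((ds.map List.tail).map List.length).sum ≤ (ds.map List.length).sum := by
      intro ds
      induction ds with
      | nil => simp
      | cons d ds ih =>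
        have : d.tail.length ≤ d.length := by simp [List.length_tail]
        simp only [List.map_cons, List.sum_cons]
        omega
    have h3 := hle cs
    simp only [List.map_cons, List.sum_cons]
    omega

-- zip(*cols): rows until the shortest column is exhausted (Python's zip truncation)
def zipStar (cols : List (List String)) : List (List String) :=
  if cols ≠ [] ∧ cols.all (fun c => !c.isEmpty) then
    cols.map (fun c => c.headD "*") :: zipStar (cols.map List.tail)
  else []
termination_by (cols.map List.length).sum
decreasing_by simpa using zipStar_sum_lt cols (by assumption)

def type2_alt (s : String) : List (List String) :=
  let n := check (PySem.Str.len s)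
  -- pad = list(s) + ['*'] * (n*n - len(s))  (a non-positive count gives [], as .toNat gives)
  let pad : List String := s.toList.map (fun c => String.ofList [c])
      ++ List.replicate (n * n - PySem.Str.len s).toNat "*"
  let columns := (PySem.List.pyRange 0 n 1).map (fun k =>
      PySem.List.slice pad (some (k * n)) (some ((k + 1) * n)))
  -- zip(*columns) is zipStar; [list(row) for row in …] is the identity under the list convention
  zipStar columns

-- ===== PRECONDITION & SPEC =====
def Spec_type2 (s : String) (out : List (List String)) : Prop := out = type2_alt s
instance (s : String) (out : List (List String)) : Decidable (Spec_type2 s out) := by unfold Spec_type2; infer_instance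

-- ===== CLAIM (what is proved, stated in full; the proofs are below) =====
def Claim_equal_type2 : Prop := ∀ (s : String), Dom_type2 s → Spec_type2 s (type2 s)

-- ===== LEMMAS AND PROOFS =====

-- the common closed form of the grid: cell (row j, column i) = s[i*m+j] if in range, else '*'
def cellG (cs : List String) (m j i : Nat) : String :=
  if i * m + j < cs.length then cs.getD (i * m + j) "*" else "*"

def gridG (cs : List String) (m : Nat) : List (List String) :=
  (List.range m).map (fun j => (List.range m).map (fun i => cellG cs m j i))

-- A-side intermediate states: columns < k are filled, the rest is '*'
def rowU (cs : List String) (m k j : Nat) : List String :=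
  (List.range m).map (fun i => if i < k then cellG cs m j i else "*")

def gridU (cs : List String) (m k : Nat) : List (List String) :=
  (List.range m).map (fun j => rowU cs m k j)

-- mid-inner-loop: rows < t already show column k, the rest still column state k
def gridM (cs : List String) (m k t : Nat) : List (List String) :=
  (List.range m).map (fun j => if j < t then rowU cs m (k + 1) j else rowU cs m k j)

theorem rowU_zero (cs : List String) (m j : Nat) :
    rowU cs m 0 j = List.replicate m "*" := by
  apply List.ext_getElem <;> simp [rowU]

theorem gridM_zero (cs : List String) (m k : Nat) :
    gridM cs m k 0 = gridU cs m k := by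
  simp [gridM, gridU]

theorem gridM_full (cs : List String) (m k : Nat) :
    gridM cs m k m = gridU cs m (k + 1) := by
  unfold gridM gridU
  apply List.map_congr_left
  intro j hj
  simp only [List.mem_range] at hj
  simp [hj]

theorem gridU_full (cs : List String) (m : Nat) :
    gridU cs m m = gridG cs m := by
  unfold gridU gridG
  apply List.map_congr_left
  intro j _
  unfold rowU
  apply List.map_congr_left
  intro i hi
  simp only [List.mem_range] at hi
  simp [hi]

-- when cell (t, k) is out of the string, advancing t changes nothing
theorem gridM_succ_of_ge (cs : List String) (m k t : Nat) (ht : t < m)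
    (hge : ¬ k * m + t < cs.length) :
    gridM cs m k (t + 1) = gridM cs m k t := by
  unfold gridM
  apply List.map_congr_left
  intro j hj
  simp only [List.mem_range] at hj
  by_cases hjt : j < t
  · simp [hjt, Nat.lt_succ_of_lt hjt]
  · by_cases hjt' : j = t
    · subst hjt'
      simp only [Nat.lt_succ_self, if_pos, hjt]
      unfold rowU
      apply List.map_congr_left
      intro i hi
      simp only [List.mem_range] at hi
      by_cases hik : i < k
      · simp [hik, Nat.lt_succ_of_lt hik]
      · by_cases hik' : i = k
        · subst hik'
          simp [cellG, hge]
        · have : ¬ i < k + 1 := by omega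
          simp [hik, this]
    · have h1 : ¬ j < t + 1 := by omega
      simp [hjt, h1]

-- setting row t's column k to its final value advances t
theorem gridM_succ_set (cs : List String) (m k t : Nat) (hk : k < m) (ht : t < m) :
    gridM cs m k (t + 1) =
      (gridM cs m k t).set t ((rowU cs m k t).set k (cellG cs m t k)) := by
  have hrow : (rowU cs m k t).set k (cellG cs m t k) = rowU cs m (k + 1) t := by
    apply List.ext_getElem
    · simp [rowU]
    · intro i h1 h2
      simp only [rowU, List.length_set, List.length_map, List.length_range] at h1 h2
      by_cases hik : i = k
      · subst hik
        simp [rowU]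
      · simp only [rowU, List.getElem_set, if_neg (by omega : ¬ (k = i))]
        simp only [List.getElem_map, List.getElem_range]
        by_cases hlt : i < k
        · simp [hlt, Nat.lt_succ_of_lt hlt]
        · have h3 : ¬ i < k + 1 := by omega
          simp [hlt, h3]
  rw [hrow]
  apply List.ext_getElem
  · simp [gridM]
  · intro j h1 h2
    simp only [gridM, List.length_map, List.length_range] at h1
    simp only [gridM, List.getElem_set, List.getElem_map, List.getElem_range]
    by_cases hjt : j = t
    · subst hjt
      simp
    · simp only [if_neg (by omega : ¬ (t = j))]
      by_cases hlt : j < t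
      · simp [hlt, Nat.lt_succ_of_lt hlt]
      · have h3 : ¬ j < t + 1 := by omega
        simp [hlt, h3]

-- reading row j of a mid-state with j ≥ t gives rowU k j
theorem gridM_getD (cs : List String) (m k t j : Nat) (hj : j < m) (hjt : t ≤ j) :
    PySem.List.pyGetD (gridM cs m k t) (j : Int) [] = rowU cs m k j := by
  rw [PySem.List.pyGetD_natCast]
  unfold gridM
  rw [List.getD_eq_getElem?_getD]
  simp only [List.getElem?_map, List.getElem?_range, hj]
  simp [show ¬ j < t by omega]

-- the A-side inner loop body, at outer value k, specialized to Nat indices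
theorem inner_inv (s : String) (m k : Nat) (hk : k < m) :
    ∀ t, t ≤ m →
      (List.range t).foldl
        (fun (st : List (List String) × Int) (j : Nat) =>
          (fun (st : List (List String) × Int) (j : Int) =>
            if st.2 > PySem.Str.len s then (st.1, st.2 + 1)
            else if st.2 < PySem.Str.len s then
              (PySem.List.pySetD st.1 j (PySem.List.pySetD (PySem.List.pyGetD st.1 j []) (k : Int)
                (match PySem.Str.pyGet? s st.2 with
                  | some c => String.ofList [c]
                  | none => "*")), st.2 + 1)
            else (st.1, st.2 + 1)) st (j : Int))
        (gridU (s.toList.map (fun c => String.ofList [c])) m k, ((k * m : Nat) : Int))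
      = (gridM (s.toList.map (fun c => String.ofList [c])) m k t, ((k * m + t : Nat) : Int)) := by
  intro t
  induction t with
  | zero => intro _; simp [gridM_zero]
  | succ t ih =>
    intro hle
    have ht : t < m := by omega
    rw [List.range_succ, List.foldl_append, ih (by omega)]
    simp only [List.foldl_cons, List.foldl_nil]
    set cs := s.toList.map (fun c => String.ofList [c]) with hcs
    have hL : PySem.Str.len s = (cs.length : Int) := by
      rw [PySem.Str.len_eq, hcs]; simp
    by_cases hgt : (cs.length : Int) < ((k * m + t : Nat) : Int)
    · -- a > len(s): no-op
      simp only [hL, gt_iff_lt, if_pos hgt]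
      rw [gridM_succ_of_ge cs m k t ht (by exact_mod_cast by omega)]
      exact Prod.ext_iff.mpr ⟨rfl, by push_cast; ring⟩
    · by_cases hlt : ((k * m + t : Nat) : Int) < (cs.length : Int)
      · -- a < len(s): set lst[t][k]
        have hidx : k * m + t < cs.length := by exact_mod_cast hlt
        simp only [hL, gt_iff_lt, if_neg hgt, if_pos hlt]
        have hsl : k * m + t < s.toList.length := by
          have : cs.length = s.toList.length := by rw [hcs]; simp
          omega
        have hv : (match PySem.Str.pyGet? s ((k * m + t : Nat) : Int) with
            | some c => String.ofList [c]
            | none => "*") = cellG cs m t k := by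
          rw [PySem.Str.pyGet?_natCast]
          simp only [List.getElem?_eq_getElem hsl]
          unfold cellG
          rw [if_pos hidx, hcs]
          rw [List.getD_eq_getElem?_getD]
          simp [List.getElem?_eq_getElem hsl]
        rw [gridM_getD cs m k t t ht (le_refl t)]
        rw [hv]
        simp only [PySem.List.pySetD_natCast]
        rw [← gridM_succ_set cs m k t hk ht]
        exact Prod.ext_iff.mpr ⟨rfl, by push_cast; ring⟩
      · -- a == len(s): no-op
        simp only [hL, gt_iff_lt, if_neg hgt, if_neg hlt]
        rw [gridM_succ_of_ge cs m k t ht (by exact_mod_cast by omega)]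
        exact Prod.ext_iff.mpr ⟨rfl, by push_cast; ring⟩

theorem outer_inv (s : String) (m : Nat) :
    ∀ K, K ≤ m →
      (List.range K).foldl
        (fun (st : List (List String) × Int) (i : Nat) =>
          (List.range m).foldl
            (fun (st : List (List String) × Int) (j : Nat) =>
              (fun (st : List (List String) × Int) (j : Int) =>
                if st.2 > PySem.Str.len s then (st.1, st.2 + 1)
                else if st.2 < PySem.Str.len s then
                  (PySem.List.pySetD st.1 j (PySem.List.pySetD (PySem.List.pyGetD st.1 j []) ((i : Nat) : Int)
                    (match PySem.Str.pyGet? s st.2 with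
                      | some c => String.ofList [c]
                      | none => "*")), st.2 + 1)
                else (st.1, st.2 + 1)) st ((j : Nat) : Int)) st)
        (gridU (s.toList.map (fun c => String.ofList [c])) m 0, (0 : Int))
      = (gridU (s.toList.map (fun c => String.ofList [c])) m K, ((K * m : Nat) : Int)) := by
  intro K
  induction K with
  | zero => intro _; norm_num
  | succ K ih =>
    intro hle
    have hK : K < m := by omega
    rw [List.range_succ, List.foldl_append, ih (by omega), List.foldl_cons, List.foldl_nil]
    rw [inner_inv s m K hK m (le_refl m)]
    exact Prod.ext_iff.mpr ⟨by rw [gridM_full], by push_cast; ring⟩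

theorem type2_eq_gridG (s : String) :
    type2 s = gridG (s.toList.map (fun c => String.ofList [c])) (check (PySem.Str.len s)).toNat := by
  unfold type2
  generalize check (PySem.Str.len s) = n
  rcases (by omega : 0 ≤ n ∨ n < 0) with hpos | hneg
  · obtain ⟨m, rfl⟩ : ∃ m : Nat, n = (m : Int) := ⟨n.toNat, (Int.toNat_of_nonneg hpos).symm⟩
    simp only [PySem.List.pyRange_zero_nat, List.foldl_map, List.map_map, Int.toNat_natCast]
    have hinit : (List.range m).map ((fun _ : Int => List.replicate m "*") ∘ (fun k : Nat => (k : Int)))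
        = gridU (s.toList.map (fun c => String.ofList [c])) m 0 := by
      apply List.map_congr_left
      intro j _
      rw [rowU_zero]
      rfl
    rw [hinit]
    exact (congrArg Prod.fst (outer_inv s m m (le_refl m))).trans
      (gridU_full (s.toList.map (fun c => String.ofList [c])) m)
  · have hnil : PySem.List.pyRange 0 n 1 = [] := PySem.List.pyRange_one_eq_nil (by omega)
    have hm : n.toNat = 0 := by omega
    simp [hnil, hm, gridG]

theorem zipStar_eq (m : Nat) :
    ∀ (cols : List (List String)), cols ≠ [] → (∀ c ∈ cols, c.length = m) →
      zipStar cols = (List.range m).map (fun j => cols.map (fun c => c.getD j "*")) := by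
  induction m with
  | zero =>
    intro cols hne hlen
    rw [zipStar]
    have hcond : ¬ (cols ≠ [] ∧ cols.all (fun c => !c.isEmpty) = true) := by
      rintro ⟨h1, h2⟩
      obtain ⟨c, hc⟩ := List.exists_mem_of_ne_nil cols hne
      have hl := hlen c hc
      have ha := List.all_eq_true.mp h2 c hc
      cases c <;> simp_all
    rw [if_neg hcond]
    simp
  | succ m ih =>
    intro cols hne hlen
    have hall : cols.all (fun c => !c.isEmpty) = true := by
      apply List.all_eq_true.mpr
      intro c hc
      have hlc := hlen c hc
      cases c with
      | nil => simp at hlc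
      | cons x xs => simp
    rw [zipStar, if_pos ⟨hne, hall⟩]
    rw [ih (cols.map List.tail) (by simpa using hne) (by
      intro c hc
      simp only [List.mem_map] at hc
      obtain ⟨c0, hc0, rfl⟩ := hc
      have := hlen c0 hc0
      simp [List.length_tail, this])]
    rw [List.range_succ_eq_map]
    simp only [List.map_cons, List.map_map]
    congr 1
    · apply List.map_congr_left
      intro c hc
      have hlc := hlen c hc
      cases c with
      | nil => simp at hlc
      | cons x xs => simp
    · apply List.map_congr_left
      intro j _
      simp only [Function.comp]
      apply List.map_congr_left
      intro c hc
      have hlc := hlen c hc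
      cases c with
      | nil => simp at hlc
      | cons x xs => simp

theorem pad_getD (cs : List String) (m idx : Nat) (h : idx < m * m) :
    (cs ++ List.replicate (m * m - cs.length) "*").getD idx "*" =
      if idx < cs.length then cs.getD idx "*" else "*" := by
  by_cases hidx : idx < cs.length
  · rw [if_pos hidx, List.getD_eq_getElem?_getD, List.getD_eq_getElem?_getD,
        List.getElem?_append_left hidx]
  · rw [if_neg hidx, List.getD_eq_getElem?_getD, List.getElem?_append_right (by omega)]
    have hlt : idx - cs.length < m * m - cs.length := by omega
    simp [hlt]

theorem type2_alt_eq_gridG (s : String) :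
    type2_alt s = gridG (s.toList.map (fun c => String.ofList [c])) (check (PySem.Str.len s)).toNat := by
  unfold type2_alt
  dsimp only
  generalize check (PySem.Str.len s) = n
  set cs : List String := s.toList.map (fun c => String.ofList [c]) with hcs
  have hL : PySem.Str.len s = (cs.length : Int) := by rw [PySem.Str.len_eq, hcs]; simp
  rcases (by omega : 0 ≤ n ∨ n < 0) with hpos | hneg
  · obtain ⟨m, rfl⟩ : ∃ m : Nat, n = (m : Int) := ⟨n.toNat, (Int.toNat_of_nonneg hpos).symm⟩
    have hpad : ((m : Int) * (m : Int) - PySem.Str.len s).toNat = m * m - cs.length := by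
      rw [hL]
      have hmm : ((m : Int) * (m : Int)) = ((m * m : Nat) : Int) := by push_cast; ring
      rw [hmm]
      omega
    rw [hpad]
    rcases Nat.eq_zero_or_pos m with hm0 | hmpos
    · subst hm0
      rw [zipStar]
      simp [gridG]
    · simp only [PySem.List.pyRange_zero_nat, List.map_map, Int.toNat_natCast]
      have hcols : (List.range m).map
            ((fun k : Int => PySem.List.slice (cs ++ List.replicate (m * m - cs.length) "*")
              (some (k * (m : Int))) (some ((k + 1) * (m : Int)))) ∘ (fun k : Nat => (k : Int)))
          = (List.range m).map (fun k =>
              (((cs ++ List.replicate (m * m - cs.length) "*").drop (k * m)).take m)) := by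
        apply List.map_congr_left
        intro k _
        show PySem.List.slice _ (some ((k : Int) * (m : Int))) (some (((k : Int) + 1) * (m : Int))) = _
        have e1 : ((k : Int) * (m : Int)) = ((k * m : Nat) : Int) := by push_cast; ring
        have e2 : (((k : Int) + 1) * (m : Int)) = ((k * m + m : Nat) : Int) := by push_cast; ring
        rw [e1, e2, PySem.List.slice_natCast]
        have e3 : k * m + m - k * m = m := by omega
        rw [e3]
      rw [hcols]
      have hplen : (cs ++ List.replicate (m * m - cs.length) "*").length ≥ m * m := by
        simp [List.length_append, List.length_replicate]
        omega
      rw [zipStar_eq m _ (by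
        simp only [ne_eq, List.map_eq_nil_iff, List.range_eq_nil]
        omega) (by
        intro c hc
        simp only [List.mem_map, List.mem_range] at hc
        obtain ⟨k, hk, rfl⟩ := hc
        rw [List.length_take, List.length_drop]
        have : k * m + m ≤ m * m := by nlinarith
        omega)]
      simp only [List.map_map]
      apply List.map_congr_left
      intro j hj
      simp only [List.mem_range] at hj
      apply List.map_congr_left
      intro k hk
      simp only [List.mem_range] at hk
      show (((cs ++ List.replicate (m * m - cs.length) "*").drop (k * m)).take m).getD j "*"
        = cellG cs m j k
      have hidx : k * m + j < m * m := by nlinarith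
      have hpg := pad_getD cs m (k * m + j) hidx
      rw [List.getD_eq_getElem?_getD] at hpg ⊢
      rw [List.getElem?_take_of_lt hj, List.getElem?_drop, hpg]
      rfl
  · have hnil : PySem.List.pyRange 0 n 1 = [] := PySem.List.pyRange_one_eq_nil (by omega)
    have hm : n.toNat = 0 := by omega
    rw [hnil]
    simp only [List.map_nil]
    rw [zipStar]
    simp [hm, gridG]

-- ===== VERDICT (by name: the statement is the Claim_ definition above) =====
theorem type2_spec : Claim_equal_type2 := by
  intro s _
  show type2 s = type2_alt s
  rw [type2_eq_gridG, type2_alt_eq_gridG]
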